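-- pv_equiv track=rewrite | github.com/meuzishun/codewars | 3kyu/Alphabetic_Anagrams.py | listPosition
-- ===== SOURCE A (Python) =====
-- from collections import Counter
--
-- def listPosition(word):
--     l, r, s = len(word), 1, 1
--     c = Counter()
--
--     for i in range(l):
--         x = word[(l - 1) - i]
--         c[x] += 1
--         for y in c:
--             if (y < x):
--                 r += s * c[y] // c[x]
--         s = s * (i + 1) // c[x]
--     return r
-- ===== SOURCE B (Python) =====
-- def listPosition(word):
--     def fact(m):
--         f = 1
--         for k in range(2, m + 1):
--             f *= k
--         return f
--
--     counts = {}
--     for ch in word: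
--         counts[ch] = counts.get(ch, 0) + 1
--     rank = 1
--     n = len(word)
--     for i, x in enumerate(word):
--         rest = n - 1 - i
--         for y in counts:
--             if counts[y] > 0 and y < x:
--                 denom = 1
--                 for z in counts:
--                     v = counts[z] - 1 if z == y else counts[z]
--                     denom *= fact(v)
--                 rank += fact(rest) // denom
--         counts[x] -= 1
--     return rank
-- ===== Notes on version B (the rewrite author's own statement) =====
-- stated objective: alternative
-- what changed: A builds the rank back-to-front, keeping an incremental running multinomial `s` and a growing Counter; B computes the classic forward rank: for each position it counts smaller-starting permutations of the remaining suffix directly with factorials of the remaining character counts.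
import Mathlib
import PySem

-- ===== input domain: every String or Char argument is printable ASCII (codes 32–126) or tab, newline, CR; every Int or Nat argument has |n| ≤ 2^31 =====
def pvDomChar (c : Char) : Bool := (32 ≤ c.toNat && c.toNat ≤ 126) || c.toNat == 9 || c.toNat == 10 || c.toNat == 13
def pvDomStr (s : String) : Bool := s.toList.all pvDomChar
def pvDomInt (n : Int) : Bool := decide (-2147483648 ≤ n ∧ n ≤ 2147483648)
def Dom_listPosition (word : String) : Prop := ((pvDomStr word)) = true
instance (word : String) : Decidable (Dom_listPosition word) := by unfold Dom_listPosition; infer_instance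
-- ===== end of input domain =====

-- B replaces A's back-to-front incremental running-multinomial accumulator by the forward rank
-- computation with direct factorial arithmetic at each position (objective: alternative).

-- ===== PORT A =====
def listPosition (word : String) : Int :=
  let cs := word.toList
  let l : Int := (cs.length : Int)
  ((PySem.List.pyRange 0 l).foldl
    (fun (st : Int × Int × PySem.Dict Char Int) i =>
      -- x = word[(l - 1) - i]; the index is always in range, the `.getD ' '` default is unreachable
      let x : Char := (PySem.List.pyGet? cs (l - 1 - i)).getD ' '
      let c := st.2.2.modify x 0 (· + 1)
      (c.keys.foldl
        (fun r y => if y < x then r + PySem.Int.floordiv (st.2.1 * c.getD y 0) (c.getD x 0) else r)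
        st.1,
       PySem.Int.floordiv (st.2.1 * (i + 1)) (c.getD x 0), c))
    ((1 : Int), (1 : Int), (PySem.Dict.empty : PySem.Dict Char Int))).1

-- ===== PORT B =====
def pvFact (m : Int) : Int := (PySem.List.pyRange 2 (m + 1)).foldl (fun f k => f * k) 1

def listPosition_alt (word : String) : Int :=
  let cs := word.toList
  let counts := cs.foldl (fun (d : PySem.Dict Char Int) ch => d.insert ch (d.getD ch 0 + 1)) PySem.Dict.empty
  let n : Int := (cs.length : Int)
  ((PySem.List.enumerate cs).foldl
    (fun (st : Int × PySem.Dict Char Int) p =>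
      let rest := n - 1 - p.1
      let x := p.2
      ((st.2.keys.foldl
        (fun rank y =>
          if 0 < st.2.getD y 0 ∧ y < x then
            rank + PySem.Int.floordiv (pvFact rest)
              (st.2.keys.foldl
                (fun dn z => dn * pvFact (if z = y then st.2.getD z 0 - 1 else st.2.getD z 0)) 1)
          else rank)
        st.1),
       st.2.insert x (st.2.getD x 0 - 1)))
    ((1 : Int), counts)).1

-- ===== PRECONDITION & SPEC =====
def Spec_listPosition (word : String) (out : Int) : Prop := out = listPosition_alt word
instance (word : String) (out : Int) : Decidable (Spec_listPosition word out) := by unfold Spec_listPosition; infer_instance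

-- ===== CLAIM (what is proved, stated in full; the proofs are below) =====
def Claim_equal_listPosition : Prop := ∀ (word : String), Dom_listPosition word → Spec_listPosition word (listPosition word)

-- ===== LEMMAS AND PROOFS =====

-- the denominator ∏ (count y)! and the multinomial ("number of permutations") of a list
def pvD (l : List Char) : Nat := ∏ y ∈ l.toFinset, (l.count y).factorial
def pvP (l : List Char) : Nat := Nat.multinomial l.toFinset l.count

-- the common specification: lexicographic rank of a word among its anagrams
def specRank : List Char → Nat
  | [] => 1
  | x :: t => (∑ y ∈ (x :: t).toFinset.filter (· < x), pvP ((x :: t).erase y)) + specRank t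

lemma pvD_pos (l : List Char) : 0 < pvD l :=
  Finset.prod_pos fun _ _ => Nat.factorial_pos _

lemma pvD_spec (l : List Char) : pvD l * pvP l = (l.length).factorial := by
  have h := Nat.multinomial_spec l.toFinset l.count
  rwa [List.sum_toFinset_count_eq_length] at h

lemma pvD_subset {l : List Char} {s : Finset Char} (h : l.toFinset ⊆ s) :
    ∏ y ∈ s, (l.count y).factorial = pvD l := by
  unfold pvD
  symm
  apply Finset.prod_subset h
  intro x _ hx
  have hx' : x ∉ l := fun hm => hx (List.mem_toFinset.2 hm)
  simp [List.count_eq_zero.2 hx']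

lemma pvD_erase {y : Char} {l : List Char} (h : y ∈ l) :
    pvD l = pvD (l.erase y) * l.count y := by
  have hsub : (l.erase y).toFinset ⊆ l.toFinset := by
    intro a ha
    exact List.mem_toFinset.2 (List.erase_subset (List.mem_toFinset.1 ha))
  have hy : y ∈ l.toFinset := List.mem_toFinset.2 h
  obtain ⟨c, hc⟩ : ∃ c, l.count y = c + 1 := by
    have := List.count_pos_iff.2 h
    exact ⟨l.count y - 1, by omega⟩
  have hprod : ∏ z ∈ l.toFinset.erase y, ((l.erase y).count z).factorial
      = ∏ z ∈ l.toFinset.erase y, (l.count z).factorial := by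
    apply Finset.prod_congr rfl
    intro z hz
    rw [List.count_erase_of_ne (Finset.mem_erase.1 hz).1]
  calc pvD l = (l.count y).factorial * ∏ z ∈ l.toFinset.erase y, (l.count z).factorial := by
        rw [pvD, ← Finset.mul_prod_erase _ _ hy]
    _ = ((l.count y - 1).factorial * l.count y) * ∏ z ∈ l.toFinset.erase y, (l.count z).factorial := by
        have hfac : (l.count y).factorial = (l.count y - 1).factorial * l.count y := by
          rw [hc]
          simp only [Nat.add_sub_cancel, Nat.factorial_succ]
          ring
        rw [hfac]
    _ = (((l.erase y).count y).factorial * ∏ z ∈ l.toFinset.erase y, ((l.erase y).count z).factorial) * l.count y := by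
        rw [List.count_erase_self, hprod]; ring
    _ = (∏ z ∈ l.toFinset, ((l.erase y).count z).factorial) * l.count y := by
        rw [Finset.mul_prod_erase l.toFinset (fun z => ((l.erase y).count z).factorial) hy]
    _ = pvD (l.erase y) * l.count y := by rw [pvD_subset hsub]

lemma pvP_mul {y : Char} {l : List Char} (h : y ∈ l) :
    pvP l * l.count y = l.length * pvP (l.erase y) := by
  have hD := pvD_pos (l.erase y)
  apply Nat.eq_of_mul_eq_mul_left hD
  have hlen : 0 < l.length := List.length_pos_of_mem h
  have hle : (l.erase y).length = l.length - 1 := List.length_erase_of_mem h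
  obtain ⟨m, hm⟩ : ∃ m, l.length = m + 1 := ⟨l.length - 1, by omega⟩
  have hspec2 := pvD_spec (l.erase y)
  rw [hle, hm] at hspec2
  calc pvD (l.erase y) * (pvP l * l.count y)
      = (pvD (l.erase y) * l.count y) * pvP l := by ring
    _ = pvD l * pvP l := by rw [← pvD_erase h]
    _ = (l.length).factorial := pvD_spec l
    _ = (m + 1) * m.factorial := by rw [hm, Nat.factorial_succ]
    _ = (m + 1) * (pvD (l.erase y) * pvP (l.erase y)) := by rw [hspec2]; simp
    _ = pvD (l.erase y) * (l.length * pvP (l.erase y)) := by rw [hm]; ring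

lemma pvP_cross {x y : Char} {l : List Char} (hx : x ∈ l) (hy : y ∈ l) :
    pvP (l.erase x) * l.count y = pvP (l.erase y) * l.count x := by
  have hlen : 0 < l.length := List.length_pos_of_mem hx
  apply Nat.eq_of_mul_eq_mul_left hlen
  calc l.length * (pvP (l.erase x) * l.count y)
      = (l.length * pvP (l.erase x)) * l.count y := by ring
    _ = (pvP l * l.count x) * l.count y := by rw [← pvP_mul hx]
    _ = (pvP l * l.count y) * l.count x := by ring
    _ = (l.length * pvP (l.erase y)) * l.count x := by rw [pvP_mul hy]
    _ = l.length * (pvP (l.erase y) * l.count x) := by ring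

lemma pvP_perm {l l' : List Char} (h : l.Perm l') : pvP l = pvP l' := by
  unfold pvP
  rw [List.toFinset_eq_of_perm _ _ h]
  exact Nat.multinomial_congr fun a _ => h.count_eq a

lemma pvP_nil : pvP [] = 1 := by simp [pvP]

-- a guarded accumulating loop over a Nodup key list is a Finset sum
lemma foldl_if_add_sum (p : Char → Prop) [DecidablePred p] (g : Char → Int) (K : List Char)
    (hK : K.Nodup) (r : Int) :
    K.foldl (fun r y => if p y then r + g y else r) r = r + ∑ y ∈ K.toFinset.filter p, g y := by
  rw [PySem.List.foldl_ite_eq_foldl_filter p (fun acc y => acc + g y), PySem.List.foldl_add]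
  congr 1
  have h1 : (K.filter (fun y => decide (p y))).toFinset = K.toFinset.filter p := by
    rw [List.toFinset_filter]
    ext a
    simp
  rw [← h1, List.sum_toFinset g (hK.filter _)]

lemma foldl_mul_map (K : List Char) (h : Char → Int) :
    K.foldl (fun a z => a * h z) 1 = (K.map h).prod := by
  rw [List.prod_eq_foldl, List.foldl_map]

lemma toFinset_ofList (xs : List Char) : (PySem.Set.ofList xs).toFinset = xs.toFinset := by
  ext a
  simp [List.mem_toFinset, PySem.Set.mem_ofList]

lemma pvFact_natCast (n : Nat) : pvFact (n : Int) = ((n.factorial : Nat) : Int) := by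
  induction n with
  | zero => decide
  | succ n ih =>
    rcases Nat.eq_zero_or_pos n with hn | hn
    · subst hn; decide
    · have h2 : (2 : Int) ≤ (n : Int) + 1 := by omega
      have hcast : ((n + 1 : Nat) : Int) + 1 = ((n : Int) + 1) + 1 := by push_cast; ring
      rw [pvFact, hcast, PySem.List.pyRange_one_succ_right h2, List.foldl_append]
      rw [show (PySem.List.pyRange 2 ((n : Int) + 1)).foldl (fun f k => f * k) 1 = pvFact (n : Int) from rfl]
      rw [ih]
      simp only [List.foldl_cons, List.foldl_nil]
      push_cast [Nat.factorial_succ]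
      ring

-- ===== the B-side loop =====
lemma B_loop (cs : List Char) (suffix : List Char) :
    ∀ (k rank : Int) (d : PySem.Dict Char Int),
    d.keys.Nodup → d.keys = PySem.Set.ofList cs →
    (∀ y, d.getD y 0 = (suffix.count y : Int)) →
    (∀ y ∈ suffix, y ∈ cs) →
    k + (suffix.length : Int) = (cs.length : Int) →
    ((PySem.List.enumerate suffix k).foldl
      (fun (st : Int × PySem.Dict Char Int) p =>
        ((st.2.keys.foldl
          (fun rank y =>
            if 0 < st.2.getD y 0 ∧ y < p.2 then
              rank + PySem.Int.floordiv (pvFact ((cs.length : Int) - 1 - p.1))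
                (st.2.keys.foldl
                  (fun dn z => dn * pvFact (if z = y then st.2.getD z 0 - 1 else st.2.getD z 0)) 1)
            else rank)
          st.1),
         st.2.insert p.2 (st.2.getD p.2 0 - 1)))
      (rank, d)).1 = rank + (specRank suffix : Int) - 1 := by
  induction suffix with
  | nil =>
    intro k rank d _ _ _ _ _
    simp [PySem.List.enumerate, specRank]
  | cons x t ih =>
    intro k rank d hnd hkeys hget hsub hlen
    have hxcs : x ∈ cs := hsub x (List.mem_cons_self)
    have hcont : d.contains x = true := by
      rw [PySem.Dict.contains_iff_mem_keys, hkeys, PySem.Set.mem_ofList]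
      exact hxcs
    have hrest : (cs.length : Int) - 1 - k = ((t.length : Nat) : Int) := by
      simp only [List.length_cons] at hlen
      push_cast at hlen ⊢
      omega
    -- the inner sum
    have hsum :
        d.keys.foldl
          (fun rank y =>
            if 0 < d.getD y 0 ∧ y < x then
              rank + PySem.Int.floordiv (pvFact ((cs.length : Int) - 1 - k))
                (d.keys.foldl
                  (fun dn z => dn * pvFact (if z = y then d.getD z 0 - 1 else d.getD z 0)) 1)
            else rank)
          rank
        = rank + ((∑ y ∈ (x :: t).toFinset.filter (· < x), pvP ((x :: t).erase y) : Nat) : Int) := by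
      rw [foldl_if_add_sum (fun y => 0 < d.getD y 0 ∧ y < x) _ _ hnd]
      congr 1
      have hsets : d.keys.toFinset.filter (fun y => 0 < d.getD y 0 ∧ y < x)
          = (x :: t).toFinset.filter (· < x) := by
        ext a
        simp only [Finset.mem_filter, List.mem_toFinset, hkeys, toFinset_ofList, hget]
        constructor
        · rintro ⟨_, hpos, hlt⟩
          refine ⟨?_, hlt⟩
          have : 0 < (x :: t).count a := by exact_mod_cast hpos
          exact List.count_pos_iff.1 this
        · rintro ⟨hmem, hlt⟩
          refine ⟨hsub a hmem, ?_, hlt⟩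
          have : 0 < (x :: t).count a := List.count_pos_iff.2 hmem
          exact_mod_cast this
      rw [hsets, Nat.cast_sum]
      apply Finset.sum_congr rfl
      intro y hy
      obtain ⟨hyM, hylt⟩ := Finset.mem_filter.1 hy
      have hyM' : y ∈ x :: t := List.mem_toFinset.1 hyM
      have hycnt : 0 < (x :: t).count y := List.count_pos_iff.2 hyM'
      -- the denominator is the product of factorials of the counts of (x::t).erase y
      have hden : d.keys.foldl
            (fun dn z => dn * pvFact (if z = y then d.getD z 0 - 1 else d.getD z 0)) 1
          = ((pvD ((x :: t).erase y) : Nat) : Int) := by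
        rw [foldl_mul_map]
        have hmap : d.keys.map
              (fun z => pvFact (if z = y then d.getD z 0 - 1 else d.getD z 0))
            = d.keys.map (fun z => ((((x :: t).erase y).count z).factorial : Int)) := by
          apply List.map_congr_left
          intro z _
          by_cases hz : z = y
          · subst hz
            rw [if_pos rfl, hget, List.count_erase_self]
            have : ((x :: t).count z : Int) - 1 = (((x :: t).count z - 1 : Nat) : Int) := by
              omega
            rw [this, pvFact_natCast]
          · rw [if_neg hz, hget, List.count_erase_of_ne hz, pvFact_natCast]
        rw [hmap]
        have : d.keys.map (fun z => ((((x :: t).erase y).count z).factorial : Int))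
            = (d.keys.map (fun z => (((x :: t).erase y).count z).factorial)).map
                (fun n : Nat => (n : Int)) := by
          rw [List.map_map]; rfl
        rw [this, ← Nat.cast_list_prod]
        congr 1
        rw [← List.prod_toFinset _ hnd]
        have hsubF : ((x :: t).erase y).toFinset ⊆ d.keys.toFinset := by
          intro a ha
          rw [hkeys, toFinset_ofList, List.mem_toFinset]
          exact hsub a (List.erase_subset (List.mem_toFinset.1 ha))
        exact pvD_subset hsubF
      rw [hden, hrest, pvFact_natCast]
      have hlenE : ((x :: t).erase y).length = t.length := by
        rw [List.length_erase_of_mem hyM']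
        simp
      rw [PySem.Int.floordiv_natCast]
      congr 1
      apply Nat.div_eq_of_eq_mul_left (pvD_pos _)
      rw [← hlenE, ← pvD_spec ((x :: t).erase y)]
      ring
    -- the dict update
    have hgets' : ∀ y, (d.insert x (d.getD x 0 - 1)).getD y 0 = (t.count y : Int) := by
      intro y
      rw [PySem.Dict.getD_insert]
      by_cases hyx : y = x
      · subst hyx
        rw [if_pos rfl, hget]
        simp [List.count_cons_self]
      · rw [if_neg hyx, hget]
        have hxy : ¬x = y := fun h => hyx h.symm
        simp [hxy]
    simp only [PySem.List.enumerate, List.foldl_cons]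
    rw [ih (k + 1) _ _
      (by rw [PySem.Dict.keys_insert_of_contains _ _ hcont]; exact hnd)
      (by rw [PySem.Dict.keys_insert_of_contains _ _ hcont]; exact hkeys)
      hgets'
      (fun y hy => hsub y (List.mem_cons_of_mem _ hy))
      (by simp only [List.length_cons] at hlen; push_cast at hlen ⊢; omega)]
    simp only [hsum]
    rw [show specRank (x :: t)
        = (∑ y ∈ (x :: t).toFinset.filter (· < x), pvP ((x :: t).erase y)) + specRank t from rfl]
    push_cast
    ring

-- ===== the A-side loop =====
lemma A_loop (cs : List Char) (m : Nat) (hm : m ≤ cs.length) :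
    (List.range m).foldl
      (fun (st : Int × Int × PySem.Dict Char Int) (kk : Nat) =>
        let x : Char := (PySem.List.pyGet? cs ((cs.length : Int) - 1 - (kk : Int))).getD ' '
        let c := st.2.2.modify x 0 (· + 1)
        (c.keys.foldl
          (fun r y => if y < x then r + PySem.Int.floordiv (st.2.1 * c.getD y 0) (c.getD x 0) else r)
          st.1,
         PySem.Int.floordiv (st.2.1 * ((kk : Int) + 1)) (c.getD x 0), c))
      ((1 : Int), (1 : Int), (PySem.Dict.empty : PySem.Dict Char Int))
    = (((specRank ((cs.reverse.take m).reverse) : Nat) : Int),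
       ((pvP (cs.reverse.take m) : Nat) : Int),
       PySem.Dict.counter (cs.reverse.take m)) := by
  induction m with
  | zero => simp [specRank, pvP_nil, PySem.Dict.counter]
  | succ m ih =>
    have hm' : m ≤ cs.length := Nat.le_of_succ_le hm
    have hmlt : m < cs.length := hm
    rw [List.range_succ, List.foldl_append, ih hm']
    have hrevlen : m < cs.reverse.length := by simpa using hmlt
    set x := cs.reverse[m]'hrevlen with hxdef
    -- the fetched character is cs.reverse[m]
    have hidx : (cs.length : Int) - 1 - (m : Int) = ((cs.length - 1 - m : Nat) : Int) := by
      omega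
    have hget : (PySem.List.pyGet? cs ((cs.length : Int) - 1 - (m : Int))).getD ' ' = x := by
      rw [hidx, PySem.List.pyGet?_natCast, List.getElem?_eq_getElem (by omega)]
      simp [hxdef, List.getElem_reverse]
    have htake : cs.reverse.take (m + 1) = cs.reverse.take m ++ [x] := by
      rw [List.take_add_one, List.getElem?_eq_getElem hrevlen]
      rfl
    set t : List Char := (cs.reverse.take m).reverse with htdef
    have hperm : (cs.reverse.take m ++ [x]).Perm (x :: t) :=
      (List.perm_append_singleton x _).trans (List.Perm.cons x (List.reverse_perm _).symm)
    have hxM : x ∈ x :: t := List.mem_cons_self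
    have hcountx : 0 < (x :: t).count x := List.count_pos_iff.2 hxM
    have htlen : t.length = m := by
      simp [htdef, List.length_take, Nat.min_eq_left (by simpa using hm')]
    have hc : (PySem.Dict.counter (cs.reverse.take m)).modify x 0 (· + 1)
        = PySem.Dict.counter (cs.reverse.take m ++ [x]) :=
      (PySem.Dict.counter_append_singleton _ _).symm
    simp only [List.foldl_cons, List.foldl_nil, hget, hc]
    have hkeysc : (PySem.Dict.counter (cs.reverse.take m ++ [x])).keys
        = PySem.Set.ofList (cs.reverse.take m ++ [x]) := PySem.Dict.keys_counter _
    have hndc : (PySem.Dict.counter (cs.reverse.take m ++ [x])).keys.Nodup :=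
      PySem.Dict.nodup_keys_counter _
    have hgetc : ∀ y, (PySem.Dict.counter (cs.reverse.take m ++ [x])).getD y 0
        = ((x :: t).count y : Int) := by
      intro y
      rw [PySem.Dict.getD_counter, hperm.count_eq]
    -- the inner sum
    have hsum : (PySem.Dict.counter (cs.reverse.take m ++ [x])).keys.foldl
          (fun r y => if y < x then
            r + PySem.Int.floordiv
              (((pvP (cs.reverse.take m) : Nat) : Int)
                * (PySem.Dict.counter (cs.reverse.take m ++ [x])).getD y 0)
              ((PySem.Dict.counter (cs.reverse.take m ++ [x])).getD x 0)
            else r)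
          ((specRank ((cs.reverse.take m).reverse) : Nat) : Int)
        = ((specRank (x :: t) : Nat) : Int) := by
      rw [foldl_if_add_sum (· < x) _ _ hndc]
      have hsets : (PySem.Dict.counter (cs.reverse.take m ++ [x])).keys.toFinset.filter (· < x)
          = (x :: t).toFinset.filter (· < x) := by
        rw [hkeysc, toFinset_ofList, List.toFinset_eq_of_perm _ _ hperm]
      rw [hsets]
      rw [show specRank (x :: t)
          = (∑ y ∈ (x :: t).toFinset.filter (· < x), pvP ((x :: t).erase y)) + specRank t from rfl]
      have hterm : ∀ y ∈ (x :: t).toFinset.filter (· < x),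
          PySem.Int.floordiv
            (((pvP (cs.reverse.take m) : Nat) : Int)
              * (PySem.Dict.counter (cs.reverse.take m ++ [x])).getD y 0)
            ((PySem.Dict.counter (cs.reverse.take m ++ [x])).getD x 0)
          = ((pvP ((x :: t).erase y) : Nat) : Int) := by
        intro y hy
        obtain ⟨hyM, _⟩ := Finset.mem_filter.1 hy
        have hyM' : y ∈ x :: t := List.mem_toFinset.1 hyM
        have hP : pvP (cs.reverse.take m) = pvP ((x :: t).erase x) := by
          rw [List.erase_cons_head]
          exact pvP_perm (List.reverse_perm _).symm
        rw [hgetc, hgetc, hP]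
        have hcast : ((pvP ((x :: t).erase x) : Nat) : Int) * (((x :: t).count y : Nat) : Int)
            = ((pvP ((x :: t).erase x) * (x :: t).count y : Nat) : Int) := by push_cast; ring
        rw [hcast, PySem.Int.floordiv_natCast]
        congr 1
        rw [pvP_cross hxM hyM', Nat.mul_div_cancel _ hcountx]
      rw [Finset.sum_congr rfl hterm, ← Nat.cast_sum]
      push_cast
      ring
    -- the new running multinomial
    have hs : PySem.Int.floordiv
          (((pvP (cs.reverse.take m) : Nat) : Int) * ((m : Int) + 1))
          ((PySem.Dict.counter (cs.reverse.take m ++ [x])).getD x 0)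
        = ((pvP (cs.reverse.take (m + 1)) : Nat) : Int) := by
      have hP : pvP (cs.reverse.take m) = pvP t := pvP_perm (List.reverse_perm _).symm
      have hcast : ((pvP t : Nat) : Int) * ((m : Int) + 1)
          = ((pvP t * (t.length + 1) : Nat) : Int) := by
        rw [htlen]; push_cast; ring
      rw [hgetc, hP, hcast, PySem.Int.floordiv_natCast]
      have hPtake : pvP (cs.reverse.take (m + 1)) = pvP (x :: t) := by
        rw [htake]; exact pvP_perm hperm
      rw [hPtake]
      congr 1
      apply Nat.div_eq_of_eq_mul_left hcountx
      have hmul := pvP_mul (l := x :: t) (y := x) hxM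
      rw [List.erase_cons_head] at hmul
      rw [hmul, List.length_cons]
      ring
    rw [hsum, hs, htake]
    have : specRank (x :: t) = specRank ((cs.reverse.take m ++ [x]).reverse) := by
      rw [List.reverse_append]
      rfl
    rw [this]

-- assembling the two sides
lemma main_eq (word : String) : listPosition word = listPosition_alt word := by
  have hA : listPosition word = ((specRank word.toList : Nat) : Int) := by
    rw [listPosition]
    simp only [PySem.List.pyRange_zero_natCast, List.foldl_map]
    have h1 : word.toList.reverse.take word.toList.length = word.toList.reverse := by
      rw [← List.length_reverse, List.take_length]
    rw [A_loop word.toList word.toList.length (le_refl _), h1]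
    simp [List.reverse_reverse]
  have hd0keys : (word.toList.foldl
      (fun (d : PySem.Dict Char Int) ch => d.insert ch (d.getD ch 0 + 1)) PySem.Dict.empty).keys
      = PySem.Set.ofList word.toList := by
    rw [PySem.Dict.keys_foldl_insert]
    rw [PySem.Set.ofList_eq_foldl]
    rfl
  have hB : listPosition_alt word = ((specRank word.toList : Nat) : Int) := by
    rw [listPosition_alt]
    simp only []
    rw [B_loop word.toList word.toList 0 1 _
      (by rw [hd0keys]; exact PySem.Set.nodup_ofList _)
      hd0keys
      (fun y => by
        rw [PySem.Dict.getD_foldl_insert_add_one]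
        simp [PySem.Dict.getD_empty])
      (fun y hy => hy)
      (by simp)]
    ring
  rw [hA, hB]

-- ===== VERDICT (by name: the statement is the Claim_ definition above) =====
theorem listPosition_spec : Claim_equal_listPosition := by
  intro word _
  unfold Spec_listPosition
  exact main_eq word
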